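-- pv_equiv track=rewrite | github.com/RADobson/doppeldown | ml/src/dataset_generator.py | _max_char_repetition
-- ===== SOURCE A (Python) =====
-- def _max_char_repetition(s: str) -> int:
--     """Find maximum consecutive character repetition."""
--     if not s:
--         return 0
--
--     max_rep = 1
--     current_rep = 1
--
--     for i in range(1, len(s)):
--         if s[i] == s[i-1]:
--             current_rep += 1
--             max_rep = max(max_rep, current_rep)
--         else:
--             current_rep = 1
--
--     return max_rep
-- ===== SOURCE B (Python) =====
-- def _max_char_repetition(s: str) -> int:
--     """Partition s into maximal runs of equal characters, then take the longest run."""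
--     runs = []
--     i = 0
--     n = len(s)
--     while i < n:
--         j = i
--         while j < n and s[j] == s[i]:
--             j += 1
--         runs.append(j - i)
--         i = j
--     return max(runs, default=0)
-- ===== Notes on version B (the rewrite author's own statement) =====
-- stated objective: alternative
-- what changed: B partitions the string into maximal runs of equal characters (an outer loop that scans each whole run at once) and reduces over the list of run lengths with max(..., default=0), instead of A's single character-by-character scan maintaining running max/current counters.
import Mathlib
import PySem

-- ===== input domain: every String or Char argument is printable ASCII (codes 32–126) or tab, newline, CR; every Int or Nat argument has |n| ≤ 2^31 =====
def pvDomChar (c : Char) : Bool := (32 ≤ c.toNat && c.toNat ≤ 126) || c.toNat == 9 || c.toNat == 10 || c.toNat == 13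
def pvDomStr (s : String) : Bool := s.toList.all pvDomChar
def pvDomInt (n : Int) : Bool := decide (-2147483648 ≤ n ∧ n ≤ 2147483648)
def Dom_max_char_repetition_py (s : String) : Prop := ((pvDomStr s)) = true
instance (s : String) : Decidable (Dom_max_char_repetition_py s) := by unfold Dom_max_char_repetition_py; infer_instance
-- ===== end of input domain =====

-- B partitions the string into maximal runs of equal characters and takes the longest
-- run (max with default 0), instead of A's running max/current counters; alternative, same cost.

-- ===== PORT A =====
-- literal port of A's index loop; indices i and i-1 are always in range, so pyGetD's
-- default 'a' is never consulted
def max_char_repetition_py (s : String) : Int :=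
  let cs := s.toList
  if cs = [] then 0
  else
    ((PySem.List.pyRange 1 (PySem.Str.len s) 1).foldl
      (fun (acc : Int × Int) i =>
        if PySem.List.pyGetD cs i 'a' = PySem.List.pyGetD cs (i - 1) 'a'
        then (max acc.1 (acc.2 + 1), acc.2 + 1)
        else (acc.1, 1)) (1, 1)).1

-- ===== PORT B =====
-- inner while loop of Source B: `while j < n and s[j] == s[i]: j += 1` starting just past
-- the run's head; returns (number of further copies of ch consumed, remaining suffix)
def pvScan (ch : Char) : List Char → Int × List Char
  | [] => (0, [])
  | y :: ys => if y = ch then ((pvScan ch ys).1 + 1, (pvScan ch ys).2) else (0, y :: ys)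

lemma pvScan_len (ch : Char) (l : List Char) : (pvScan ch l).2.length ≤ l.length := by
  induction l with
  | nil => simp [pvScan]
  | cons y ys ih =>
    by_cases h : y = ch
    · simp only [pvScan, if_pos h, List.length_cons]
      omega
    · simp [pvScan, h]

-- outer while loop of Source B: builds the list `runs` of maximal-run lengths (j - i)
def pvRunLens : List Char → List Int
  | [] => []
  | y :: ys =>
      ((pvScan y ys).1 + 1) :: pvRunLens (pvScan y ys).2
termination_by l => l.length
decreasing_by
  have := pvScan_len y ys
  simp
  omega

def max_char_repetition_py_alt (s : String) : Int :=
  PySem.List.maxD (pvRunLens s.toList) (fun y => y) 0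

-- ===== PRECONDITION & SPEC =====
def Spec_max_char_repetition_py (s : String) (out : Int) : Prop := out = max_char_repetition_py_alt s
instance (s : String) (out : Int) : Decidable (Spec_max_char_repetition_py s out) := by unfold Spec_max_char_repetition_py; infer_instance

-- ===== CLAIM (what is proved, stated in full; the proofs are below) =====
def Claim_equal_max_char_repetition_py : Prop := ∀ (s : String), Dom_max_char_repetition_py s → Spec_max_char_repetition_py s (max_char_repetition_py s)

-- ===== LEMMAS AND PROOFS =====

-- structural form of A's loop: prev char, running max, current run, remaining chars
def loopA : Char → Int → Int → List Char → Int × Int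
  | _, m, c, [] => (m, c)
  | p, m, c, y :: ys => if y = p then loopA y (max m (c + 1)) (c + 1) ys else loopA y m 1 ys

-- structural form of B's run builder: current char, its count so far, remaining chars
def pvRuns : Char → Int → List Char → List Int
  | _, c, [] => [c]
  | p, c, y :: ys => if y = p then pvRuns p (c + 1) ys else c :: pvRuns y 1 ys

lemma loopA_cons_eq (p y : Char) (m c : Int) (ys : List Char) (h : y = p) :
    loopA p m c (y :: ys) = loopA y (max m (c + 1)) (c + 1) ys := by simp [loopA, h]

lemma loopA_cons_ne (p y : Char) (m c : Int) (ys : List Char) (h : ¬ y = p) :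
    loopA p m c (y :: ys) = loopA y m 1 ys := by simp [loopA, h]

lemma pvRuns_cons_eq (p y : Char) (c : Int) (ys : List Char) (h : y = p) :
    pvRuns p c (y :: ys) = pvRuns p (c + 1) ys := by simp [pvRuns, h]

lemma pvRuns_cons_ne (p y : Char) (c : Int) (ys : List Char) (h : ¬ y = p) :
    pvRuns p c (y :: ys) = c :: pvRuns y 1 ys := by simp [pvRuns, h]

lemma pvRunLens_eq_pvRuns : ∀ (rest : List Char) (p : Char) (c : Int),
    (c + (pvScan p rest).1) :: pvRunLens (pvScan p rest).2 = pvRuns p c rest := by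
  intro rest
  induction rest with
  | nil => intro p c; simp [pvScan, pvRuns, pvRunLens]
  | cons y ys ih =>
    intro p c
    by_cases h : y = p
    · subst h
      rw [pvRuns_cons_eq y y c ys rfl,
        show pvScan y (y :: ys) = ((pvScan y ys).1 + 1, (pvScan y ys).2) from by simp [pvScan],
        ← ih y (c + 1)]
      congr 1
      ring
    · rw [pvRuns_cons_ne p y c ys h,
        show pvScan p (y :: ys) = (0, y :: ys) from by simp [pvScan, h]]
      show (c + 0) :: pvRunLens (y :: ys) = c :: pvRuns y 1 ys
      rw [add_zero, pvRunLens, ← ih y 1,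
        show (pvScan y ys).1 + 1 = 1 + (pvScan y ys).1 from by ring]

lemma pvRunLens_cons (x : Char) (xs : List Char) : pvRunLens (x :: xs) = pvRuns x 1 xs := by
  rw [pvRunLens, ← pvRunLens_eq_pvRuns xs x 1]
  congr 1
  ring

lemma absorb : ∀ (rest : List Char) (p : Char) (c m e : Int), e ≤ c →
    (pvRuns p c rest).foldl max (max m e) = (pvRuns p c rest).foldl max m := by
  intro rest
  induction rest with
  | nil =>
    intro p c m e he
    simp only [pvRuns, List.foldl]
    rw [max_assoc, max_eq_right he]
  | cons y ys ih =>
    intro p c m e he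
    by_cases h : y = p
    · rw [pvRuns_cons_eq p y c ys h]
      exact ih p (c + 1) m e (by omega)
    · rw [pvRuns_cons_ne p y c ys h]
      simp only [List.foldl]
      rw [max_assoc, max_eq_right he]

lemma key : ∀ (rest : List Char) (p : Char) (m c : Int), 1 ≤ c → c ≤ m →
    (loopA p m c rest).1 = (pvRuns p c rest).foldl max m := by
  intro rest
  induction rest with
  | nil =>
    intro p m c h1 hm
    simp only [loopA, pvRuns, List.foldl]
    rw [max_eq_left hm]
  | cons y ys ih =>
    intro p m c h1 hm
    by_cases h : y = p
    · subst h
      rw [loopA_cons_eq y y m c ys rfl, pvRuns_cons_eq y y c ys rfl,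
        ih y (max m (c + 1)) (c + 1) (by omega) (le_max_right _ _)]
      exact absorb ys y (c + 1) m (c + 1) le_rfl
    · rw [loopA_cons_ne p y m c ys h, pvRuns_cons_ne p y c ys h]
      simp only [List.foldl]
      rw [ih y m 1 le_rfl (by omega), max_eq_left (by omega : c ≤ m)]

lemma bfold : ∀ (rest : List Char) (p : Char) (c : Int),
    PySem.List.maxD (pvRuns p c rest) (fun y => y) 0 = (pvRuns p c rest).foldl max c := by
  intro rest
  induction rest with
  | nil =>
    intro p c
    simp [pvRuns, pysem]
  | cons y ys ih =>
    intro p c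
    by_cases h : y = p
    · rw [pvRuns_cons_eq p y c ys h, ih p (c + 1),
        ← absorb ys p (c + 1) c (c + 1) le_rfl]
      congr 1
      rw [max_eq_right (by omega)]
    · rw [pvRuns_cons_ne p y c ys h,
        show ((c :: pvRuns y 1 ys).foldl max c) = (pvRuns y 1 ys).foldl max (max c c) from rfl,
        max_self]
      simp [pysem]

lemma bridgeA : ∀ (rest pre : List Char) (p : Char) (m c : Int),
    (PySem.List.pyRange ((pre.length : Int) + 1) (((pre ++ p :: rest).length : Int)) 1).foldl
      (fun (acc : Int × Int) i =>
        if PySem.List.pyGetD (pre ++ p :: rest) i 'a' = PySem.List.pyGetD (pre ++ p :: rest) (i - 1) 'a'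
        then (max acc.1 (acc.2 + 1), acc.2 + 1)
        else (acc.1, 1)) (m, c)
    = loopA p m c rest := by
  intro rest
  induction rest with
  | nil =>
    intro pre p m c
    rw [PySem.List.pyRange_one_eq_nil (by simp)]
    rfl
  | cons y ys ih =>
    intro pre p m c
    rw [PySem.List.pyRange_one_cons (by push_cast [List.length_append, List.length_cons]; omega)]
    have h1 : PySem.List.pyGetD (pre ++ p :: y :: ys) ((pre.length : Int) + 1) 'a' = y := by
      rw [show ((pre.length : Int) + 1) = ((pre.length + 1 : Nat) : Int) from by push_cast; ring,
        PySem.List.pyGetD_natCast]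
      simp [List.getD_eq_getElem?_getD]
    have h2 : PySem.List.pyGetD (pre ++ p :: y :: ys) ((pre.length : Int) + 1 - 1) 'a' = p := by
      rw [show ((pre.length : Int) + 1 - 1) = ((pre.length : Nat) : Int) from by ring,
        PySem.List.pyGetD_natCast]
      simp [List.getD_eq_getElem?_getD]
    simp only [List.foldl_cons, h1, h2]
    have hl : pre ++ p :: y :: ys = (pre ++ [p]) ++ y :: ys := by simp
    have hs : ((pre.length : Int) + 1 + 1) = (((pre ++ [p]).length : Nat) : Int) + 1 := by
      simp
    by_cases h : y = p
    · rw [if_pos h, loopA_cons_eq p y m c ys h]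
      rw [hl, hs]
      exact ih (pre ++ [p]) y (max m (c + 1)) (c + 1)
    · rw [if_neg h, loopA_cons_ne p y m c ys h]
      rw [hl, hs]
      exact ih (pre ++ [p]) y m 1

lemma A_list (x : Char) (xs : List Char) :
    ((PySem.List.pyRange 1 (((x :: xs).length : Int)) 1).foldl
      (fun (acc : Int × Int) i =>
        if PySem.List.pyGetD (x :: xs) i 'a' = PySem.List.pyGetD (x :: xs) (i - 1) 'a'
        then (max acc.1 (acc.2 + 1), acc.2 + 1)
        else (acc.1, 1)) (1, 1)).1
    = (loopA x 1 1 xs).1 := by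
  have h := bridgeA xs [] x 1 1
  simp only [List.nil_append, List.length_nil, Nat.cast_zero, zero_add] at h
  exact congrArg Prod.fst h

-- ===== VERDICT (by name: the statement is the Claim_ definition above) =====
theorem max_char_repetition_py_spec : Claim_equal_max_char_repetition_py := by
  intro s _
  unfold Spec_max_char_repetition_py max_char_repetition_py max_char_repetition_py_alt
  cases h : s.toList with
  | nil => simp [PySem.List.maxD, PySem.List.max?, pvRunLens]
  | cons x xs =>
    simp only [h, PySem.Str.len_eq, reduceCtorEq, if_false]
    rw [A_list x xs, pvRunLens_cons, key xs x 1 1 le_rfl le_rfl, bfold xs x 1]
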